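-- pv_equiv track=rewrite | github.com/NirmalScaria/Competitive-programming | Codeforces/CONTEST1629/C_Meximum_Array.py | mexarr
-- ===== SOURCE A (Python) =====
-- def mexarr(arr):
--     kmex, t, res = 0, set(), []
--     for i in arr[::-1]:
--         t.add(i)
--         while(kmex in t):
--             kmex+=1
--         res+=[kmex]
--     res.reverse()
--     return(res+[0])
-- ===== SOURCE B (Python) =====
-- def mexarr(arr):
--     n = len(arr)
--     res = []
--     for i in range(n + 1):
--         vals = sorted(set(x for x in arr[i:] if x >= 0))
--         m = 0
--         for v in vals:
--             if v == m:
--                 m += 1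
--             elif v > m:
--                 break
--         res.append(m)
--     return res
-- ===== Notes on version B (the rewrite author's own statement) =====
-- stated objective: alternative
-- what changed: B computes the mex of each suffix independently (sorted set of nonnegative suffix values + linear gap scan with early break) instead of A's incremental right-to-left set maintenance with a monotone while-loop mex pointer.
import Mathlib
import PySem

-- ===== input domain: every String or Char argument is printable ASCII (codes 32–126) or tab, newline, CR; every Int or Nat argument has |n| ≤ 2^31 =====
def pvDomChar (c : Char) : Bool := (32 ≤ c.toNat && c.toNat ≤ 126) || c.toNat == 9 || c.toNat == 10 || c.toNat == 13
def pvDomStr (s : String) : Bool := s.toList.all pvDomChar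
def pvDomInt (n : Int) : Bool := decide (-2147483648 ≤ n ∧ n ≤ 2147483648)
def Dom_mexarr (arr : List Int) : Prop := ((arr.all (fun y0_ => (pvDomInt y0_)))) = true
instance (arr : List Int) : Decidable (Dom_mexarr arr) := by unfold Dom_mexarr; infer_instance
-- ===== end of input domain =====

-- B recomputes the mex of each suffix independently (sorted set + linear gap scan) instead of
-- A's incremental right-to-left set/while maintenance; objective: alternative (not faster).

-- ===== PORT A =====
-- termination helper for the while-loop port (cited by mexFrom's decreasing_by)
theorem pvFilterGeLt (t : List Int) (k : Int) (h : k ∈ t) :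
    (t.filter (fun x => decide (k + 1 ≤ x))).length < (t.filter (fun x => decide (k ≤ x))).length := by
  induction t with
  | nil => simp at h
  | cons a t ih =>
    have hmono := List.countP_mono_left (l := t) (p := fun x => decide (k + 1 ≤ x))
      (q := fun x => decide (k ≤ x)) (by intro x _ hx; simp_all; omega)
    simp only [← List.countP_eq_length_filter] at *
    rcases List.mem_cons.1 h with rfl | hm
    · rw [List.countP_cons_of_pos (p := fun x => decide (k ≤ x)) (a := k) (l := t) (by simp),
        List.countP_cons_of_neg (p := fun x => decide (k + 1 ≤ x)) (a := k) (l := t) (by simp)]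
      omega
    · have := ih hm
      by_cases hb : k + 1 ≤ a
      · rw [List.countP_cons_of_pos (p := fun x => decide (k ≤ x)) (a := a) (l := t) (by simp; omega),
          List.countP_cons_of_pos (p := fun x => decide (k + 1 ≤ x)) (a := a) (l := t) (by simp [hb])]
        omega
      · rw [List.countP_cons_of_neg (p := fun x => decide (k + 1 ≤ x)) (a := a) (l := t) (by simp [hb])]
        by_cases hc : k ≤ a
        · rw [List.countP_cons_of_pos (p := fun x => decide (k ≤ x)) (a := a) (l := t) (by simp [hc])]
          omega
        · rw [List.countP_cons_of_neg (p := fun x => decide (k ≤ x)) (a := a) (l := t) (by simp [hc])]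
          omega

-- the 'while kmex in t: kmex += 1' loop of A
def mexFrom (t : PySem.Set Int) (k : Int) : Int :=
  if h : PySem.Set.contains t k then mexFrom t (k + 1) else k
termination_by (t.filter (fun x => decide (k ≤ x))).length
decreasing_by
  exact pvFilterGeLt t k (by simpa [PySem.Set.contains_iff] using h)

-- the 'for i in arr[::-1]' loop of A, threading (t, kmex, res)
def goA : List Int → PySem.Set Int → Int → List Int → List Int
  | [], _, _, res => res
  | i :: rest, t, kmex, res =>
    let t' := PySem.Set.add t i
    let k' := mexFrom t' kmex
    goA rest t' k' (res ++ [k'])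

def mexarr (arr : List Int) : List Int :=
  -- arr[::-1] is arr.reverse (PySem.List.slice?_none_none_neg_one)
  let res := goA arr.reverse PySem.Set.empty 0 []
  res.reverse ++ [0]

-- ===== PORT B =====
-- the 'for v in vals: …' loop with its break
def scanB (m : Int) : List Int → Int
  | [] => m
  | v :: rest => if v = m then scanB (m + 1) rest else if v > m then m else scanB m rest

def mexarr_alt (arr : List Int) : List Int :=
  (PySem.List.pyRange 0 ((arr.length : Int) + 1) 1).map (fun i =>
    let vals := PySem.List.sorted
      (PySem.Set.ofList ((PySem.List.slice arr (some i) none).filter (fun x => decide (0 ≤ x))))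
      (fun x => x) false
    scanB 0 vals)

-- ===== PRECONDITION & SPEC =====
def Spec_mexarr (arr : List Int) (out : List Int) : Prop := out = mexarr_alt arr
instance (arr : List Int) (out : List Int) : Decidable (Spec_mexarr arr out) := by unfold Spec_mexarr; infer_instance

-- ===== CLAIM (what is proved, stated in full; the proofs are below) =====
def Claim_equal_mexarr : Prop := ∀ (arr : List Int), Dom_mexarr arr → Spec_mexarr arr (mexarr arr)

-- ===== LEMMAS AND PROOFS =====

theorem mexFrom_le (t : PySem.Set Int) (k : Int) : k ≤ mexFrom t k := by
  induction k using mexFrom.induct (t := t) with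
  | case1 k h ih => rw [mexFrom, dif_pos h]; omega
  | case2 k h => rw [mexFrom, dif_neg h]

theorem mexFrom_mem_of_lt (t : PySem.Set Int) (k : Int) :
    ∀ m, k ≤ m → m < mexFrom t k → m ∈ t := by
  induction k using mexFrom.induct (t := t) with
  | case1 k h ih =>
    intro m hkm hlt
    rw [mexFrom, dif_pos h] at hlt
    rcases eq_or_lt_of_le hkm with rfl | hlt2
    · exact (PySem.Set.contains_iff _ _).1 h
    · exact ih m (by omega) hlt
  | case2 k h =>
    intro m hkm hlt
    rw [mexFrom, dif_neg h] at hlt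
    omega

-- membership-congruence above the start point
theorem mexFrom_congr_ge (s s' : PySem.Set Int) (k : Int)
    (h : ∀ x, k ≤ x → (x ∈ s ↔ x ∈ s')) : mexFrom s k = mexFrom s' k := by
  induction k using mexFrom.induct (t := s) with
  | case1 k hc ih =>
    have hc' : PySem.Set.contains s' k = true := by
      rw [PySem.Set.contains_iff]
      exact (h k le_rfl).1 ((PySem.Set.contains_iff s k).1 hc)
    rw [mexFrom, dif_pos hc]
    conv_rhs => rw [mexFrom, dif_pos hc']
    exact ih (fun x hx => h x (by omega))
  | case2 k hc =>
    have hc' : ¬ PySem.Set.contains s' k = true := by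
      rw [PySem.Set.contains_iff]
      intro hm
      exact hc ((PySem.Set.contains_iff s k).2 ((h k le_rfl).2 hm))
    rw [mexFrom, dif_neg hc]
    rw [mexFrom, dif_neg hc']

theorem mexFrom_of_all_below (s : PySem.Set Int) (j k : Int) (hjk : j ≤ k)
    (h : ∀ m, j ≤ m → m < k → m ∈ s) : mexFrom s j = mexFrom s k := by
  obtain ⟨n, hn⟩ : ∃ n : Nat, k = j + n := ⟨(k - j).toNat, by omega⟩
  subst hn
  clear hjk
  induction n generalizing j with
  | zero => simp
  | succ n ih =>
    have hj : j ∈ s := h j le_rfl (by omega)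
    have h1 : mexFrom s j = mexFrom s (j + 1) := by
      conv_lhs => rw [mexFrom, dif_pos ((PySem.Set.contains_iff s j).2 hj)]
    rw [h1]
    have h2 := ih (j + 1) (fun m hm hmk => h m (by omega) (by push_cast at hmk ⊢; omega))
    rw [h2]
    congr 1
    push_cast
    ring

theorem mexFrom_cons_lt (v : Int) (rest : List Int) :
    ∀ k, v < k → mexFrom (v :: rest) k = mexFrom rest k := by
  intro k
  induction k using mexFrom.induct (t := rest) with
  | case1 k hc ih =>
    intro hvk
    have hc2 : PySem.Set.contains (v :: rest) k = true := by
      rw [PySem.Set.contains_iff]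
      exact List.mem_cons_of_mem v ((PySem.Set.contains_iff rest k).1 hc)
    rw [mexFrom, dif_pos hc2]
    conv_rhs => rw [mexFrom, dif_pos hc]
    exact ih (by omega)
  | case2 k hc =>
    intro hvk
    have hc2 : ¬ PySem.Set.contains (v :: rest) k = true := by
      rw [PySem.Set.contains_iff]
      intro hm
      rcases List.mem_cons.1 hm with rfl | hm2
      · omega
      · exact hc ((PySem.Set.contains_iff rest k).2 hm2)
    rw [mexFrom, dif_neg hc2]
    rw [mexFrom, dif_neg hc]

theorem mexFrom_nil (k : Int) : mexFrom ([] : PySem.Set Int) k = k := by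
  rw [mexFrom, dif_neg (by simp)]

theorem scanB_eq_mexFrom (vals : List Int) :
    ∀ m, vals.Pairwise (· < ·) → (∀ v ∈ vals, m ≤ v) → scanB m vals = mexFrom vals m := by
  induction vals with
  | nil => intro m _ _; rw [scanB, mexFrom_nil]
  | cons v rest ih =>
    intro m hpw hge
    have hvrest : ∀ y ∈ rest, v < y := by
      intro y hy
      exact (List.pairwise_cons.1 hpw).1 y hy
    by_cases hvm : v = m
    · subst hvm
      rw [scanB, if_pos rfl]
      have h1 : scanB (v + 1) rest = mexFrom rest (v + 1) := by
        apply ih (v + 1) (List.Pairwise.of_cons hpw)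
        intro y hy; have := hvrest y hy; omega
      rw [h1]
      have hc2 : PySem.Set.contains (v :: rest) v = true := by
        rw [PySem.Set.contains_iff]; exact List.mem_cons_self
      conv_rhs => rw [mexFrom, dif_pos hc2]
      exact (mexFrom_cons_lt v rest (v + 1) (by omega)).symm
    · have hmv : m < v := lt_of_le_of_ne (hge v List.mem_cons_self) (fun he => hvm he.symm)
      rw [scanB, if_neg hvm, if_pos (by omega : v > m)]
      have hc2 : ¬ PySem.Set.contains (v :: rest) m = true := by
        rw [PySem.Set.contains_iff]
        intro hm
        rcases List.mem_cons.1 hm with rfl | hm2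
        · omega
        · have := hvrest m hm2; omega
      conv_rhs => rw [mexFrom, dif_neg hc2]

theorem goA_spec (l : List Int) :
    ∀ (t : PySem.Set Int) (k : Int) (res : List Int), k = mexFrom t 0 →
      goA l t k res = res ++ (List.range l.length).map (fun j => mexFrom (t ++ l.take (j + 1)) 0) := by
  induction l with
  | nil => intro t k res _; simp [goA]
  | cons i rest ih =>
    intro t k res hk
    have h0k : 0 ≤ k := hk ▸ mexFrom_le t 0
    have hmemadd : ∀ x : Int, x ∈ PySem.Set.add t i ↔ x ∈ t ++ [i] := by
      intro x
      rw [PySem.Set.mem_add]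
      simp
    have hk' : mexFrom (PySem.Set.add t i) k = mexFrom (PySem.Set.add t i) 0 := by
      refine (mexFrom_of_all_below (PySem.Set.add t i) 0 k h0k ?_).symm
      intro m hm hmk
      exact (PySem.Set.mem_add t i m).2 (Or.inl (mexFrom_mem_of_lt t 0 m hm (hk ▸ hmk)))
    rw [goA]
    rw [ih (PySem.Set.add t i) (mexFrom (PySem.Set.add t i) k) (res ++ [mexFrom (PySem.Set.add t i) k]) hk']
    rw [List.length_cons, List.range_succ_eq_map, List.map_cons, List.map_map]
    rw [List.append_assoc, List.singleton_append]
    congr 1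
    congr 1
    · -- head element
      rw [hk']
      apply mexFrom_congr_ge
      intro x _
      rw [hmemadd x]
      simp
    · -- tail elements
      apply List.map_congr_left
      intro j _
      show mexFrom (PySem.Set.add t i ++ rest.take (j + 1)) 0
          = mexFrom (t ++ (i :: rest).take (j.succ + 1)) 0
      apply mexFrom_congr_ge
      intro x _
      simp only [List.mem_append, Nat.succ_eq_add_one, List.take_succ_cons, List.mem_cons]
      rw [PySem.Set.mem_add]
      tauto

theorem altElem (arr : List Int) (i : Nat) :
    scanB 0 (PySem.List.sorted
        (PySem.Set.ofList ((arr.drop i).filter (fun x => decide (0 ≤ x)))) (fun x => x) false)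
      = mexFrom (arr.drop i) 0 := by
  have hpw := PySem.List.sorted_ofList_pairwise_lt ((arr.drop i).filter (fun x => decide (0 ≤ x)))
  have hmem : ∀ x : Int, x ∈ PySem.List.sorted
      (PySem.Set.ofList ((arr.drop i).filter (fun x => decide (0 ≤ x)))) (fun x => x) false
      ↔ (x ∈ arr.drop i ∧ 0 ≤ x) := by
    intro x
    rw [PySem.List.mem_sorted, PySem.Set.mem_ofList, List.mem_filter]
    simp
  have hge : ∀ v ∈ PySem.List.sorted
      (PySem.Set.ofList ((arr.drop i).filter (fun x => decide (0 ≤ x)))) (fun x => x) false,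
      (0:Int) ≤ v := fun v hv => ((hmem v).1 hv).2
  rw [scanB_eq_mexFrom _ 0 hpw hge]
  apply mexFrom_congr_ge
  intro x hx
  rw [hmem x]
  exact ⟨fun h => h.1, fun h => ⟨h, hx⟩⟩

theorem mainEq (arr : List Int) :
    ((List.range arr.length).map (fun j => mexFrom (arr.reverse.take (j + 1)) 0)).reverse ++ [0]
      = (List.range (arr.length + 1)).map (fun k => mexFrom (arr.drop k) 0) := by
  apply List.ext_getElem
  · simp
  · intro i h1 h2
    have hi1 : i < arr.length + 1 := by simpa using h2
    rw [List.getElem_map, List.getElem_range]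
    by_cases hi : i < arr.length
    · rw [List.getElem_append_left (by simpa using hi)]
      rw [List.getElem_reverse]
      rw [List.getElem_map, List.getElem_range]
      simp only [List.length_map, List.length_range]
      have he : (arr.length - 1 - i) + 1 = arr.length - i := by omega
      rw [he]
      rw [show arr.reverse.take (arr.length - i) = (arr.drop i).reverse from
        (List.reverse_drop).symm]
      apply mexFrom_congr_ge
      intro x _
      exact List.mem_reverse
    · have he : i = arr.length := by omega
      subst he
      rw [List.getElem_append_right (by simp)]
      simp only [List.length_reverse, List.length_map, List.length_range]
      rw [List.drop_length, mexFrom_nil]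
      simp

-- ===== VERDICT (by name: the statement is the Claim_ definition above) =====
theorem mexarr_spec : Claim_equal_mexarr := by
  intro arr _
  show mexarr arr = mexarr_alt arr
  unfold mexarr mexarr_alt
  rw [goA_spec arr.reverse PySem.Set.empty 0 [] (mexFrom_nil 0).symm]
  rw [show (PySem.Set.empty : PySem.Set Int) = ([] : List Int) from rfl]
  simp only [List.nil_append, List.length_reverse]
  rw [PySem.List.pyRange_one]
  rw [show (((arr.length : Int) + 1) - 0).toNat = arr.length + 1 by omega]
  rw [List.map_map]
  rw [mainEq arr]
  apply List.map_congr_left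
  intro k hk
  simp only [Function.comp_apply]
  show mexFrom (arr.drop k) 0 = scanB 0 (PySem.List.sorted
    (PySem.Set.ofList ((PySem.List.slice arr (some (0 + (k : Int))) none).filter
      (fun x => decide (0 ≤ x)))) (fun x => x) false)
  rw [zero_add, PySem.List.slice_from_natCast]
  exact (altElem arr k).symm
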